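-- pv_equiv track=rewrite | github.com/cnpetra/sc-acopf-viz | WF_tools/make_fig_funtions.py | Update_line_colors
-- ===== SOURCE A (Python) =====
-- def Update_line_colors(lines_coords, WF_lines_index):
--     line_colors = []
--     for i, line_coords in enumerate(lines_coords):
--         num_coords = len(line_coords)
--
--         # Check what lines are within safe distance of the WF
--         if i in WF_lines_index:
--             line_colors.append("red")
--         else:
--             line_colors.append("green")
--
--     return line_colors
-- ===== SOURCE B (Python) =====
-- def Update_line_colors(lines_coords, WF_lines_index):
--     colors = ["green"] * len(lines_coords)
--     for idx in WF_lines_index: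
--         if 0 <= idx < len(colors):
--             colors[idx] = "red"
--     return colors
-- ===== Notes on version B (the rewrite author's own statement) =====
-- stated objective: alternative
-- what changed: B builds an all-'green' list of the right length once and then overrides the positions named by WF_lines_index to 'red' (default-then-override over the index set), instead of A's per-element loop over lines_coords with a membership test on each index.
import Mathlib
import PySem

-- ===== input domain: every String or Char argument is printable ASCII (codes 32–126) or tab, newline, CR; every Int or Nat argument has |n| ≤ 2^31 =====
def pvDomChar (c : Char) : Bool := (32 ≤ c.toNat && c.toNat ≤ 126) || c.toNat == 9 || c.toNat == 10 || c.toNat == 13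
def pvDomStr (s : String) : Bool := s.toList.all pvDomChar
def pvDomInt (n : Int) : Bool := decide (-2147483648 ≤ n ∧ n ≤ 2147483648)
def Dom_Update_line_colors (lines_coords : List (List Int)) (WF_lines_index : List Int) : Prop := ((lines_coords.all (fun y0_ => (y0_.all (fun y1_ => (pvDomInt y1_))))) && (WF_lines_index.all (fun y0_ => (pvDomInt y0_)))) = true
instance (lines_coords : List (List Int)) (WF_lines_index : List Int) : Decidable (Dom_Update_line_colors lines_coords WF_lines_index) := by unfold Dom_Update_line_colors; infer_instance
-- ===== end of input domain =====

-- B builds an all-"green" list once, then overrides the in-range positions listed in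
-- WF_lines_index to "red" (default-then-override), instead of A's per-element membership test.


-- ===== PORT A =====
def Update_line_colors (lines_coords : List (List Int)) (WF_lines_index : List Int) : List String :=
  (PySem.List.enumerate lines_coords 0).foldl
    (fun line_colors p =>
      -- num_coords = len(line_coords) is computed and unused in A
      if WF_lines_index.contains p.1 then line_colors ++ ["red"]
      else line_colors ++ ["green"])
    []

-- ===== PORT B =====
def pvSetRed (colors : List String) (idx : Int) : List String :=
  if 0 ≤ idx ∧ idx < (colors.length : Int) then colors.set idx.toNat "red" else colors

def Update_line_colors_alt (lines_coords : List (List Int)) (WF_lines_index : List Int) : List String :=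
  WF_lines_index.foldl pvSetRed (List.replicate lines_coords.length "green")

-- ===== PRECONDITION & SPEC =====
def Spec_Update_line_colors (lines_coords : List (List Int)) (WF_lines_index : List Int) (out : List String) : Prop := out = Update_line_colors_alt lines_coords WF_lines_index
instance (lines_coords : List (List Int)) (WF_lines_index : List Int) (out : List String) : Decidable (Spec_Update_line_colors lines_coords WF_lines_index out) := by unfold Spec_Update_line_colors; infer_instance

-- ===== CLAIM (what is proved, stated in full; the proofs are below) =====
def Claim_equal_Update_line_colors : Prop := ∀ (lines_coords : List (List Int)) (WF_lines_index : List Int), Dom_Update_line_colors lines_coords WF_lines_index → Spec_Update_line_colors lines_coords WF_lines_index (Update_line_colors lines_coords WF_lines_index)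

-- ===== LEMMAS AND PROOFS =====

-- A's append-fold is the map of the branch over the enumeration
theorem portA_eq_map (wf : List Int) (lc : List (List Int)) (s : Int) (acc : List String) :
    (PySem.List.enumerate lc s).foldl (fun line_colors p =>
        if wf.contains p.1 then line_colors ++ ["red"] else line_colors ++ ["green"]) acc
      = acc ++ (PySem.List.enumerate lc s).map
          (fun p => if wf.contains p.1 then "red" else "green") := by
  induction lc generalizing s acc with
  | nil => simp
  | cons x xs ih =>
      simp only [PySem.List.enumerate_cons, List.map_cons, List.foldl_cons]
      rw [ih]
      split <;> simp

theorem portB_length (wf : List Int) (base : List String) :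
    (wf.foldl pvSetRed base).length = base.length := by
  induction wf generalizing base with
  | nil => rfl
  | cons j wf ih =>
      simp only [List.foldl_cons, ih]
      unfold pvSetRed
      split <;> simp

theorem portB_getElem (wf : List Int) (base : List String) (i : Nat) (hi : i < base.length) :
    (wf.foldl pvSetRed base)[i]'(by rw [portB_length]; exact hi)
      = if wf.contains (i : Int) then "red" else base[i] := by
  induction wf generalizing base with
  | nil => simp
  | cons j wf ih =>
      simp only [List.foldl_cons]
      have hlen : (pvSetRed base j).length = base.length := by
        unfold pvSetRed; split <;> simp
      rw [ih (pvSetRed base j) (by rw [hlen]; exact hi)]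
      by_cases hmem : wf.contains (i : Int)
      · have hm : (i : Int) ∈ wf := by simpa using hmem
        simp [hm]
      · by_cases hji : j = (i : Int)
        · subst hji
          have : pvSetRed base (i : Int) = base.set i "red" := by
            unfold pvSetRed
            rw [if_pos ⟨Int.natCast_nonneg i, by exact_mod_cast hi⟩]
            simp
          simp [this]
        · have : (pvSetRed base j)[i]'(by rw [hlen]; exact hi) = base[i] := by
            unfold pvSetRed
            split
            · next h =>
                have : j.toNat ≠ i := by omega
                simp [List.getElem_set_ne this]
            · rfl
          have hm : ¬ (i : Int) ∈ wf := by simpa using hmem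
          have hij : ¬ ((i : Int) = j) := fun h => hji h.symm
          simp [hm, hij, this]

-- ===== VERDICT (by name: the statement is the Claim_ definition above) =====
theorem Update_line_colors_spec : Claim_equal_Update_line_colors := by
  intro lc wf _
  unfold Spec_Update_line_colors Update_line_colors Update_line_colors_alt
  rw [portA_eq_map, List.nil_append]
  apply List.ext_getElem
  · simp [portB_length]
  · intro i h1 h2
    have hb : i < (List.replicate lc.length "green").length := by
      simpa using h1
    rw [portB_getElem wf _ i hb]
    simp [PySem.List.getElem_enumerate]
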